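-- pv_equiv track=rewrite | github.com/bifurcate/mixed-platonic | src/pattern_restriction.py | finger_pattern_from_partitions
-- ===== SOURCE A (Python) =====
-- def toggle_sign(c: str) -> str | None:
--     """Flip a sign character: ``"+"`` ↔ ``"-"``.
--
--     Args:
--         c: A single-character sign string.
--
--     Returns:
--         The opposite sign, or None if *c* is neither ``"+"`` nor ``"-"``.
--     """
--     if c == "+":
--         return "-"
--     if c == "-":
--         return "+"
--     return None
--
-- def finger_pattern_from_partitions(
--     num_groups: int, in_p: tuple[int, ...], out_p: tuple[int, ...]
-- ) -> str:
--     """Build a finger pattern string from in/out partition specifications.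
--
--     Constructs a cyclic ``+``/``-`` string by iterating over *num_groups*
--     groups.  Within each group, the current sign is repeated according to
--     the in-partition, then the sign alternates according to the
--     out-partition.
--
--     Args:
--         num_groups: Number of groups (equal to ``a // 2`` from the signature).
--         in_p: In-partition tuple (one entry per group).
--         out_p: Out-partition tuple (one entry per group).
--
--     Returns:
--         A finger pattern string of ``+`` and ``-`` characters.
--     """
--     s = ""
--     c = "+"
--     for i in range(num_groups):
--         s += c
--         for j in range(in_p[i]):
--             s += c
--         s += c
--
--         for j in range(out_p[i]):
--             c = toggle_sign(c)
--             s += c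
--
--         c = toggle_sign(c)
--     return s
-- ===== SOURCE B (Python) =====
-- def finger_pattern_from_partitions(num_groups, in_p, out_p):
--     # Run-length representation: the output is a sequence of runs whose signs
--     # strictly alternate starting with '+'; sign comes from run-index parity,
--     # not from a stateful toggle.
--     runs = []
--     for i in range(num_groups):
--         runs.append(max(0, in_p[i]) + 2)
--         runs.extend([1] * max(0, out_p[i]))
--     return "".join(("+" if r % 2 == 0 else "-") * n for r, n in enumerate(runs))
-- ===== Notes on version B (the rewrite author's own statement) =====
-- stated objective: alternative
-- what changed: Replaces the character-by-character stateful sign-toggle loop with a run-length representation built in one pass (run lengths in_p[i]+2 followed by out_p[i] ones), emitting each run's sign from its index parity.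
import Mathlib
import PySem

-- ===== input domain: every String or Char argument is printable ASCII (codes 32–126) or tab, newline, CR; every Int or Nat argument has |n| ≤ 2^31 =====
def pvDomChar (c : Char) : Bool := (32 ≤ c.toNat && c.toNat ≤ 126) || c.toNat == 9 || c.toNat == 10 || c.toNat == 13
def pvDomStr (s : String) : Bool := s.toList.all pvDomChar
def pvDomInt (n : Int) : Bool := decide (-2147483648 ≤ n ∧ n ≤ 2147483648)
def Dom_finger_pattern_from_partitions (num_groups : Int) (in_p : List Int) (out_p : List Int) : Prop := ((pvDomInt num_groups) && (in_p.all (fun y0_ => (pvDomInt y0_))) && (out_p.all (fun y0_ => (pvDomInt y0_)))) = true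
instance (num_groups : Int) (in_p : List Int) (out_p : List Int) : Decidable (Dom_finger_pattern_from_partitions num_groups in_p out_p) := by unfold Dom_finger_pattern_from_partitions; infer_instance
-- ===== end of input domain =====

-- B replaces A's stateful char-by-char sign toggling with a run-length list and
-- a parity rule for run signs (alternative decomposition, same cost).


-- ===== PORT A =====
-- toggle_sign: "+"↔"-", None otherwise (here Option Char; chars model 1-char strings)
def toggleSign (c : Char) : Option Char :=
  if c = '+' then some '-' else if c = '-' then some '+' else none

-- A's body: fold over range(num_groups) carrying (s, c); the pyGet? match is a
-- totality guard for the IndexError case, which Pre_ excludes.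
def finger_pattern_from_partitions (num_groups : Int) (in_p : List Int) (out_p : List Int) : String :=
  let st := (PySem.List.pyRange 0 num_groups 1).foldl (fun (st : List Char × Char) i =>
    match PySem.List.pyGet? in_p i, PySem.List.pyGet? out_p i with
    | some a, some b =>
      let s := st.1 ++ [st.2]
      let s := (PySem.List.pyRange 0 a 1).foldl (fun s _ => s ++ [st.2]) s
      let s := s ++ [st.2]
      let st2 := (PySem.List.pyRange 0 b 1).foldl (fun (p : List Char × Char) _ =>
          let c' := (toggleSign p.2).getD p.2
          (p.1 ++ [c'], c')) (s, st.2)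
      (st2.1, (toggleSign st2.2).getD st2.2)
    | _, _ => st) ([], '+')
  String.ofList st.1

-- ===== PORT B =====
-- B's body: build the run-length list in one pass, then join runs, each run's
-- sign given by the parity of its index (pyGetD 0 is the totality guard for the
-- IndexError case excluded by Pre_).
def finger_pattern_from_partitions_alt (num_groups : Int) (in_p : List Int) (out_p : List Int) : String :=
  let runs : List Int := (PySem.List.pyRange 0 num_groups 1).foldl (fun acc i =>
      acc ++ [max 0 (PySem.List.pyGetD in_p i 0) + 2]
          ++ List.replicate (max 0 (PySem.List.pyGetD out_p i 0)).toNat 1) []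
  String.ofList (((PySem.List.enumerate runs 0).map
      (fun p => List.replicate p.2.toNat (if p.1 % 2 == 0 then '+' else '-'))).flatMap id)

-- ===== PRECONDITION & SPEC =====
-- Pre_ excludes exactly the inputs where A raises IndexError: some i < num_groups
-- indexes past the end of in_p or out_p.
def Pre_finger_pattern_from_partitions (num_groups : Int) (in_p : List Int) (out_p : List Int) : Prop :=
  num_groups ≤ (in_p.length : Int) ∧ num_groups ≤ (out_p.length : Int)
instance (num_groups : Int) (in_p : List Int) (out_p : List Int) : Decidable (Pre_finger_pattern_from_partitions num_groups in_p out_p) := by unfold Pre_finger_pattern_from_partitions; infer_instance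
def pvWitness_finger_pattern_from_partitions : Int × List Int × List Int := (2, [1, 0], [2, 1])

def Spec_finger_pattern_from_partitions (num_groups : Int) (in_p : List Int) (out_p : List Int) (out : String) : Prop := out = finger_pattern_from_partitions_alt num_groups in_p out_p
instance (num_groups : Int) (in_p : List Int) (out_p : List Int) (out : String) : Decidable (Spec_finger_pattern_from_partitions num_groups in_p out_p out) := by unfold Spec_finger_pattern_from_partitions; infer_instance

-- ===== CLAIM (what is proved, stated in full; the proofs are below) =====
def Claim_equal_finger_pattern_from_partitions : Prop := ∀ (num_groups : Int) (in_p : List Int) (out_p : List Int), Dom_finger_pattern_from_partitions num_groups in_p out_p → Pre_finger_pattern_from_partitions num_groups in_p out_p → Spec_finger_pattern_from_partitions num_groups in_p out_p (finger_pattern_from_partitions num_groups in_p out_p)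

-- ===== LEMMAS AND PROOFS =====

/-- Sign of run index `r`. -/
def pvSign (r : Nat) : Char := if r % 2 = 0 then '+' else '-'

/-- Reference rendering of a run-length list starting at run index `r`. -/
def pvRender (r : Nat) : List Int → List Char
  | [] => []
  | n :: t => List.replicate n.toNat (pvSign r) ++ pvRender (r + 1) t

theorem toggle_pvSign (r : Nat) : (toggleSign (pvSign r)).getD (pvSign r) = pvSign (r + 1) := by
  rcases Nat.even_or_odd r with h | h
  · have h0 : r % 2 = 0 := Nat.even_iff.mp h
    have h1 : (r + 1) % 2 = 1 := by omega
    simp [pvSign, h0, h1, toggleSign]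
  · have h0 : r % 2 = 1 := Nat.odd_iff.mp h
    have h1 : (r + 1) % 2 = 0 := by omega
    simp [pvSign, h0, h1, toggleSign]

theorem pvRender_append (r : Nat) (xs ys : List Int) :
    pvRender r (xs ++ ys) = pvRender r xs ++ pvRender (r + xs.length) ys := by
  induction xs generalizing r with
  | nil => simp [pvRender]
  | cons n t ih =>
    simp only [List.cons_append, pvRender, ih (r + 1), List.append_assoc, List.length_cons]
    have he : r + 1 + t.length = r + (t.length + 1) := by omega
    rw [he]

theorem foldl_const_append {α : Type} (l : List α) (c : Char) (s : List Char) :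
    l.foldl (fun s _ => s ++ [c]) s = s ++ List.replicate l.length c := by
  induction l generalizing s with
  | nil => simp
  | cons x t ih => simp [ih, List.replicate_succ, List.append_assoc]

theorem out_loop_eq {α : Type} (l : List α) (s : List Char) (r : Nat) :
    l.foldl (fun (p : List Char × Char) _ =>
        let c' := (toggleSign p.2).getD p.2
        (p.1 ++ [c'], c')) (s, pvSign r)
      = (s ++ pvRender (r + 1) (List.replicate l.length 1), pvSign (r + l.length)) := by
  induction l generalizing s r with
  | nil => simp [pvRender]
  | cons x t ih =>
    simp only [List.foldl_cons, toggle_pvSign]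
    rw [ih (s ++ [pvSign (r + 1)]) (r + 1)]
    simp only [Prod.mk.injEq]
    constructor
    · simp [List.replicate_succ, pvRender, List.append_assoc]
    · refine congrArg pvSign ?_
      simp only [List.length_cons]
      omega

/-- render of one group's runs appended. -/
theorem pvRender_group (R : List Int) (m : Int) (k : Nat) :
    pvRender 0 (R ++ [m] ++ List.replicate k 1)
      = pvRender 0 R ++ List.replicate m.toNat (pvSign R.length)
          ++ pvRender (R.length + 1) (List.replicate k 1) := by
  rw [List.append_assoc, pvRender_append]
  simp [pvRender]

/-- Main invariant: A's fold over the first `N` groups yields exactly the render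
of B's run list for those groups, and the pending sign is the parity sign. -/
theorem main_inv (in_p out_p : List Int) (N : Nat)
    (hin : N ≤ in_p.length) (hout : N ≤ out_p.length) :
    (PySem.List.pyRange 0 (N : Int) 1).foldl (fun (st : List Char × Char) i =>
      match PySem.List.pyGet? in_p i, PySem.List.pyGet? out_p i with
      | some a, some b =>
        let s := st.1 ++ [st.2]
        let s := (PySem.List.pyRange 0 a 1).foldl (fun s _ => s ++ [st.2]) s
        let s := s ++ [st.2]
        let st2 := (PySem.List.pyRange 0 b 1).foldl (fun (p : List Char × Char) _ =>
            let c' := (toggleSign p.2).getD p.2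
            (p.1 ++ [c'], c')) (s, st.2)
        (st2.1, (toggleSign st2.2).getD st2.2)
      | _, _ => st) ([], '+')
    = (pvRender 0 ((PySem.List.pyRange 0 (N : Int) 1).foldl (fun acc i =>
        acc ++ [max 0 (PySem.List.pyGetD in_p i 0) + 2]
            ++ List.replicate (max 0 (PySem.List.pyGetD out_p i 0)).toNat 1) []),
       pvSign (((PySem.List.pyRange 0 (N : Int) 1).foldl (fun acc i =>
        acc ++ [max 0 (PySem.List.pyGetD in_p i 0) + 2]
            ++ List.replicate (max 0 (PySem.List.pyGetD out_p i 0)).toNat 1) []).length)) := by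
  induction N with
  | zero => simp [PySem.List.pyRange_one_eq_nil, pvRender, pvSign]
  | succ n ih =>
    have hn : n < in_p.length := by omega
    have hn' : n < out_p.length := by omega
    have hrange : PySem.List.pyRange 0 ((n : Int) + 1) 1
        = PySem.List.pyRange 0 (n : Int) 1 ++ [(n : Int)] := by
      exact PySem.List.pyRange_one_succ_right (by positivity)
    have hget : PySem.List.pyGet? in_p (n : Int) = some in_p[n] := by
      simp [hn]
    have hget' : PySem.List.pyGet? out_p (n : Int) = some out_p[n] := by
      simp [hn']
    have hgd : PySem.List.pyGetD in_p (n : Int) 0 = in_p[n] := by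
      simp [PySem.List.pyGetD, hget]
    have hgd' : PySem.List.pyGetD out_p (n : Int) 0 = out_p[n] := by
      simp [PySem.List.pyGetD, hget']
    push_cast
    rw [hrange, List.foldl_append, List.foldl_append,
        ih (by omega) (by omega)]
    set R := (PySem.List.pyRange 0 (n : Int) 1).foldl (fun acc i =>
        acc ++ [max 0 (PySem.List.pyGetD in_p i 0) + 2]
            ++ List.replicate (max 0 (PySem.List.pyGetD out_p i 0)).toNat 1) [] with hR
    simp only [List.foldl_cons, List.foldl_nil, hget, hget', hgd, hgd']
    have hlen : (PySem.List.pyRange 0 in_p[n] 1).length = in_p[n].toNat := by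
      simp [PySem.List.length_pyRange_one]
    have hlen' : (PySem.List.pyRange 0 out_p[n] 1).length = out_p[n].toNat := by
      simp [PySem.List.length_pyRange_one]
    rw [foldl_const_append]
    rw [out_loop_eq _ _ R.length]
    simp only [hlen, hlen']
    have hmx : (max 0 out_p[n]).toNat = out_p[n].toNat := by omega
    rw [hmx, pvRender_group R (max 0 in_p[n] + 2) out_p[n].toNat]
    simp only [Prod.mk.injEq]
    constructor
    · have hrep : List.replicate (max 0 in_p[n] + 2).toNat (pvSign R.length)
          = [pvSign R.length] ++ List.replicate in_p[n].toNat (pvSign R.length)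
              ++ [pvSign R.length] := by
        have h2 : (max 0 in_p[n] + 2).toNat = in_p[n].toNat + 2 := by omega
        rw [h2, List.replicate_succ, List.replicate_succ']
        simp
      rw [hrep]
      simp [List.append_assoc]
    · rw [toggle_pvSign]
      refine congrArg pvSign ?_
      simp only [List.length_append, List.length_replicate, List.length_cons,
        List.length_nil]
      omega

/-- B's enumerate/join equals the reference render (induction shifting the start). -/
theorem alt_render (runs : List Int) (s : Nat) :
    ((PySem.List.enumerate runs (s : Int)).map
        (fun p => List.replicate p.2.toNat (if p.1 % 2 == 0 then '+' else '-'))).flatMap id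
      = pvRender s runs := by
  induction runs generalizing s with
  | nil => simp [PySem.List.enumerate_nil, pvRender]
  | cons n t ih =>
    rw [PySem.List.enumerate_cons]
    have hs : ((s : Int) % 2 == 0) = (s % 2 = 0 : Bool) := by
      rcases Nat.even_or_odd s with h | h
      · have h0 : s % 2 = 0 := Nat.even_iff.mp h
        have : (s : Int) % 2 = 0 := by omega
        simp [h0, this]
      · have h0 : s % 2 = 1 := Nat.odd_iff.mp h
        have : (s : Int) % 2 = 1 := by omega
        simp [h0, this]
    have : ((s : Int) + 1) = ((s + 1 : Nat) : Int) := by push_cast; ring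
    simp only [List.map_cons, List.flatMap_cons, this, ih (s + 1)]
    simp [pvRender, pvSign, hs]

theorem alt_render0 (runs : List Int) :
    ((PySem.List.enumerate runs 0).map
        (fun p => List.replicate p.2.toNat (if p.1 % 2 == 0 then '+' else '-'))).flatMap id
      = pvRender 0 runs := by
  simpa using alt_render runs 0

theorem nonneg_main (num_groups : Int) (in_p out_p : List Int)
    (hin : num_groups ≤ (in_p.length : Int)) (hout : num_groups ≤ (out_p.length : Int)) :
    finger_pattern_from_partitions num_groups in_p out_p
      = finger_pattern_from_partitions_alt num_groups in_p out_p := by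
  unfold finger_pattern_from_partitions finger_pattern_from_partitions_alt
  rcases le_total 0 num_groups with hpos | hneg
  · obtain ⟨N, rfl⟩ : ∃ N : Nat, num_groups = (N : Int) := ⟨num_groups.toNat, (Int.toNat_of_nonneg hpos).symm⟩
    have h1 : N ≤ in_p.length := by exact_mod_cast hin
    have h2 : N ≤ out_p.length := by exact_mod_cast hout
    simp only [main_inv in_p out_p N h1 h2, alt_render0]
  · have : PySem.List.pyRange 0 num_groups 1 = [] :=
      PySem.List.pyRange_one_eq_nil hneg
    simp [this, PySem.List.enumerate_nil]

-- ===== VERDICT (by name: the statement is the Claim_ definition above) =====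
theorem finger_pattern_from_partitions_spec : Claim_equal_finger_pattern_from_partitions := by
  intro num_groups in_p out_p _ hpre
  unfold Spec_finger_pattern_from_partitions
  exact nonneg_main num_groups in_p out_p hpre.1 hpre.2
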